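-- pv_equiv track=rewrite | github.com/ecemisildar/Leo_Sct | Leo_sct/des/request_supervisor_updates_manual.py | collect_states_from_transitions
-- ===== SOURCE A (Python) =====
-- from typing import Dict, Iterable, List, Tuple
--
-- def collect_states_from_transitions(transitions: Dict[str, Dict[str, str]]) -> List[str]:
--     states: List[str] = []
--     seen = set()
--     for state, edges in transitions.items():
--         if state not in seen:
--             states.append(state)
--             seen.add(state)
--         for nxt in edges.values():
--             if nxt not in seen:
--                 states.append(nxt)
--                 seen.add(nxt)
--     return states
-- ===== SOURCE B (Python) =====
-- from typing import Dict, List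
--
--
-- def collect_states_from_transitions(transitions: Dict[str, Dict[str, str]]) -> List[str]:
--     stream = [s for state, edges in transitions.items() for s in (state, *edges.values())]
--     first = {x: i for i, x in reversed(list(enumerate(stream)))}
--     return [x for i, x in enumerate(stream) if first[x] == i]
-- ===== Notes on version B (the rewrite author's own statement) =====
-- stated objective: alternative
-- what changed: B drops A's interleaved seen-set bookkeeping: it flattens the transitions into one candidate stream, builds a first-occurrence-index map with a reversed dict comprehension (later writes for smaller indices overwrite), and keeps exactly the stream positions equal to their element's first index.
import Mathlib
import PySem

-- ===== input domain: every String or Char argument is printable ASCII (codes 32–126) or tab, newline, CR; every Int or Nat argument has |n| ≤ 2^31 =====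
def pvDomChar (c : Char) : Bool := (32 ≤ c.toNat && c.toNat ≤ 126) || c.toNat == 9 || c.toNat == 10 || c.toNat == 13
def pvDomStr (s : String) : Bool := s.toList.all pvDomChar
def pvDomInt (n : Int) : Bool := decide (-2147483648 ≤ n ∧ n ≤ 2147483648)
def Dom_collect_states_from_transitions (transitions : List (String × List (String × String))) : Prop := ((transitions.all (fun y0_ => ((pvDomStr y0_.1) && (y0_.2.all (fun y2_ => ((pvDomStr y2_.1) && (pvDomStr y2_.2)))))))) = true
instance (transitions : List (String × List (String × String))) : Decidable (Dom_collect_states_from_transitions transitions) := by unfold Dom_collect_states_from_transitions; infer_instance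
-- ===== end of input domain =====

-- B drops A's seen-set: it builds a first-occurrence-index map over the flattened candidate
-- stream (reversed dict comprehension) and keeps exactly the positions equal to their
-- element's first index (alternative; same linear cost).


-- ===== PORT A =====
-- A: one pass over items; append state / each edge target to `states` when not yet in `seen`.
def collect_states_from_transitions (transitions : List (String × List (String × String))) : List String :=
  (transitions.foldl
    (fun (acc : List String × PySem.Set String) p =>
      let acc := if PySem.Set.contains acc.2 p.1 then acc
                 else (acc.1 ++ [p.1], PySem.Set.add acc.2 p.1)
      p.2.foldl
        (fun (q : List String × PySem.Set String) kv =>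
          if PySem.Set.contains q.2 kv.2 then q
          else (q.1 ++ [kv.2], PySem.Set.add q.2 kv.2)) acc)
    ([], PySem.Set.empty)).1

-- ===== PORT B =====
-- B: flatten to the candidate stream; `first` = {x: i for i, x in reversed(list(enumerate(stream)))};
-- keep exactly the positions i with first[x] == i. `first[x]` is total here (every streamed
-- element is a key of `first`), so the lookup is ported exactly by getD with an unused default.
def collect_states_from_transitions_alt (transitions : List (String × List (String × String))) : List String :=
  let stream := transitions.flatMap (fun p => p.1 :: p.2.map Prod.snd)
  let first : PySem.Dict String Int :=
    (PySem.List.enumerate stream).reverse.foldl (fun d p => d.insert p.2 p.1) PySem.Dict.empty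
  ((PySem.List.enumerate stream).filter (fun p => first.getD p.2 (-1) == p.1)).map Prod.snd

-- ===== PRECONDITION & SPEC =====
def Spec_collect_states_from_transitions (transitions : List (String × List (String × String))) (out : List String) : Prop := out = collect_states_from_transitions_alt transitions
instance (transitions : List (String × List (String × String))) (out : List String) : Decidable (Spec_collect_states_from_transitions transitions out) := by unfold Spec_collect_states_from_transitions; infer_instance

-- ===== CLAIM (what is proved, stated in full; the proofs are below) =====
def Claim_equal_collect_states_from_transitions : Prop := ∀ (transitions : List (String × List (String × String))), Dom_collect_states_from_transitions transitions → Spec_collect_states_from_transitions transitions (collect_states_from_transitions transitions)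

-- ===== LEMMAS AND PROOFS =====

-- A's inner fold preserves equality of the two components of its state.
theorem pv_inner_eq (edges : List (String × String)) (s : List String) :
    edges.foldl
      (fun (q : List String × PySem.Set String) kv =>
        if PySem.Set.contains q.2 kv.2 then q
        else (q.1 ++ [kv.2], PySem.Set.add q.2 kv.2)) (s, s)
    = (edges.foldl (fun (t : PySem.Set String) kv => PySem.Set.add t kv.2) s,
       edges.foldl (fun (t : PySem.Set String) kv => PySem.Set.add t kv.2) s) := by
  induction edges generalizing s with
  | nil => rfl
  | cons kv rest ih =>
    simp only [List.foldl_cons, PySem.Set.add]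
    split <;> exact ih _

-- A's outer fold, started from an equal pair, keeps the pair equal and each component is
-- the Set.add-fold over the flattened candidate stream.
theorem pv_outer_eq (transitions : List (String × List (String × String))) (s : List String) :
    transitions.foldl
      (fun (acc : List String × PySem.Set String) p =>
        let acc := if PySem.Set.contains acc.2 p.1 then acc
                   else (acc.1 ++ [p.1], PySem.Set.add acc.2 p.1)
        p.2.foldl
          (fun (q : List String × PySem.Set String) kv =>
            if PySem.Set.contains q.2 kv.2 then q
            else (q.1 ++ [kv.2], PySem.Set.add q.2 kv.2)) acc) (s, s)
    = (((transitions.flatMap (fun p => p.1 :: p.2.map Prod.snd)).foldl PySem.Set.add s : List String),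
       (transitions.flatMap (fun p => p.1 :: p.2.map Prod.snd)).foldl PySem.Set.add s) := by
  induction transitions generalizing s with
  | nil => simp
  | cons p rest ih =>
    simp only [List.foldl_cons, List.flatMap_cons, List.foldl_append]
    have hhead : (if PySem.Set.contains (s : PySem.Set String) p.1 then ((s : List String), (s : PySem.Set String))
                  else (s ++ [p.1], PySem.Set.add s p.1)) = (PySem.Set.add s p.1, PySem.Set.add s p.1) := by
      simp only [PySem.Set.add]; split <;> rfl
    rw [hhead, pv_inner_eq, ih]
    congr 2 <;> simp [List.foldl_map]

-- Folding Set.add over ys from acc appends exactly the deduped ys minus what acc holds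
-- (specialised below to the dedup cons equation).
theorem pv_foldl_add_split (ys acc : List String) :
    ys.foldl PySem.Set.add acc
      = acc ++ (PySem.List.dedup ys).filter (fun y => !acc.contains y) := by
  induction ys generalizing acc with
  | nil => simp [PySem.List.dedup, PySem.Set.ofList]
  | cons y ys ih =>
    have hdedup : PySem.List.dedup (y :: ys)
        = [y] ++ (PySem.List.dedup ys).filter (fun z => !([y] : List String).contains z) := by
      have := ih ([y] : List String)
      simpa [PySem.List.dedup_eq_ofList, PySem.Set.ofList, PySem.Set.add] using this
    rw [List.foldl_cons, ih, hdedup]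
    simp only [PySem.Set.add, PySem.Set.contains]
    by_cases hy : y ∈ acc
    · simp only [List.contains_eq_mem, hy, decide_true, if_true]
      rw [List.filter_append, List.filter_filter]
      have h1 : List.filter (fun z => !decide (z ∈ acc)) [y] = [] := by simp [hy]
      rw [h1, List.nil_append]
      apply congrArg
      apply List.filter_congr
      intro z _
      by_cases hz : z ∈ acc
      · simp [hz]
      · have hne : z ≠ y := fun h => hz (h ▸ hy)
        simp [hz, hne]
    · simp only [List.contains_eq_mem, hy, decide_false, Bool.false_eq_true, if_false]
      rw [List.filter_append, List.filter_filter]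
      have h1 : List.filter (fun z => !decide (z ∈ acc)) [y] = [y] := by simp [hy]
      rw [h1, List.append_assoc]
      apply congrArg
      apply congrArg
      apply List.filter_congr
      intro z _
      by_cases h1 : z ∈ acc <;> by_cases h2 : z = y <;> simp [h1, h2]

-- dedup cons equation.
theorem pv_dedup_cons (y : String) (ys : List String) :
    PySem.List.dedup (y :: ys) = y :: (PySem.List.dedup ys).filter (fun z => !(z == y)) := by
  have := pv_foldl_add_split ys ([y] : List String)
  simp only [PySem.List.dedup_eq_ofList, PySem.Set.ofList, List.foldl_cons, PySem.Set.add] at *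
  simpa [List.contains_eq_mem] using this

-- The first index of x in l, as the Python dict lookup yields it (-1 never reached for x ∈ l).
def pvFirstVal (l : List String) (x : String) : Int :=
  match PySem.List.index? l x with
  | some k => (k : Int)
  | none => -1

-- get? of the reversed-insert fold is the FIRST matching pair of es.
theorem pv_get?_rev_fold (es : List (Int × String)) (d0 : PySem.Dict String Int) (x : String) :
    (es.reverse.foldl (fun d p => d.insert p.2 p.1) d0).get? x
      = (match es.find? (fun p => p.2 == x) with
         | some p => some p.1
         | none => d0.get? x) := by
  induction es with
  | nil => rfl
  | cons p es ih =>
    rw [List.reverse_cons, List.foldl_append, List.foldl_cons, List.foldl_nil,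
        PySem.Dict.get?_insert]
    by_cases h : p.2 = x
    · rw [List.find?_cons_of_pos (by simp [h]), if_pos h.symm]
    · rw [List.find?_cons_of_neg (by simp [h]), if_neg (Ne.symm h), ih]

-- find? over enumerate finds the first index.
theorem pv_find?_enumerate (l : List String) (s : Int) (x : String) :
    (PySem.List.enumerate l s).find? (fun p => p.2 == x)
      = (PySem.List.index? l x).map (fun k : Nat => (s + (k : Int), x)) := by
  induction l generalizing s with
  | nil => simp [PySem.List.enumerate_nil, PySem.List.index?_eq_idxOf?]
  | cons y l ih =>
    rw [PySem.List.enumerate_cons]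
    by_cases h : y = x
    · subst h
      rw [List.find?_cons_of_pos (by simp), PySem.List.index?_cons_self]
      simp
    · rw [List.find?_cons_of_neg (by simp [h]), ih,
         PySem.List.index?_cons_of_ne _ h]
      cases PySem.List.index? l x with
      | none => rfl
      | some k =>
        simp only [Option.map_some, Option.some.injEq, Prod.mk.injEq]
        exact ⟨by push_cast; ring, trivial⟩

-- the Python lookup first[x] (ported as getD … (-1)) computes pvFirstVal of the stream.
theorem pv_getD_first (l : List String) (x : String) :
    ((PySem.List.enumerate l).reverse.foldl (fun d p => d.insert p.2 p.1)
        PySem.Dict.empty).getD x (-1) = pvFirstVal l x := by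
  rw [PySem.Dict.getD_eq_get?_getD, pv_get?_rev_fold, pv_find?_enumerate]
  unfold pvFirstVal
  cases PySem.List.index? l x with
  | none => rfl
  | some k => simp

-- index? in pre ++ t when x avoids pre.
theorem pv_index?_append_right (pre t : List String) (x : String) (h : x ∉ pre) :
    PySem.List.index? (pre ++ t) x = (PySem.List.index? t x).map (· + pre.length) := by
  induction pre with
  | nil => simp
  | cons y pre ih =>
    have hne : y ≠ x := fun he => h (he ▸ List.mem_cons_self)
    rw [List.cons_append, PySem.List.index?_cons_of_ne _ hne,
        ih (fun hm => h (List.mem_cons_of_mem _ hm))]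
    cases PySem.List.index? t x <;> simp <;> omega

-- CORE: filtering enumerate of a suffix t (starting at |pre|) by "position = first index in
-- pre ++ t" yields dedup t minus what pre already holds.
theorem pv_suffix_select (t pre : List String) :
    ((PySem.List.enumerate t (pre.length : Int)).filter
        (fun p => pvFirstVal (pre ++ t) p.2 == p.1)).map Prod.snd
      = (PySem.List.dedup t).filter (fun z => !pre.contains z) := by
  induction t generalizing pre with
  | nil => simp [PySem.List.enumerate_nil]
  | cons y t ih =>
    rw [PySem.List.enumerate_cons, pv_dedup_cons]
    have htail : (PySem.List.enumerate t ((pre.length : Int) + 1)).filter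
          (fun p => pvFirstVal (pre ++ y :: t) p.2 == p.1)
        = (PySem.List.enumerate t (((pre ++ [y]).length : Int))).filter
          (fun p => pvFirstVal ((pre ++ [y]) ++ t) p.2 == p.1) := by
      rw [List.append_assoc, List.singleton_append, List.length_append,
          List.length_singleton]
      push_cast
      rfl
    by_cases hy : y ∈ pre
    · -- y seen before: its first index lies inside pre, strictly below |pre| → head dropped
      have hidx : PySem.List.index? (pre ++ y :: t) y = PySem.List.index? pre y :=
        PySem.List.index?_append_of_mem _ hy
      obtain ⟨k, hk⟩ := Option.isSome_iff_exists.mp ((PySem.List.index?_isSome_iff _ _).mpr hy)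
      have hklt : k < pre.length := (PySem.List.getElem_of_index?_eq_some hk).1
      have hcond : (pvFirstVal (pre ++ y :: t) y == (pre.length : Int)) = false := by
        unfold pvFirstVal
        simp only [hidx, hk, beq_eq_false_iff_ne, ne_eq]
        intro hc
        omega
      rw [List.filter_cons, hcond, if_neg Bool.false_ne_true, htail, ih (pre ++ [y])]
      rw [List.filter_cons]
      have hyc : (!pre.contains y) = false := by simp [hy]
      rw [hyc, if_neg Bool.false_ne_true, List.filter_filter]
      apply List.filter_congr
      intro z _
      by_cases h1 : z = y <;> by_cases h2 : z ∈ pre <;> simp [h1, h2]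
    · -- y new: its first index is exactly |pre| → head kept
      have hidx : PySem.List.index? (pre ++ y :: t) y
          = (PySem.List.index? (y :: t) y).map (· + pre.length) :=
        pv_index?_append_right pre (y :: t) y hy
      have hcond : (pvFirstVal (pre ++ y :: t) y == (pre.length : Int)) = true := by
        unfold pvFirstVal
        rw [hidx, PySem.List.index?_cons_self]
        simp
      rw [List.filter_cons, hcond, if_pos rfl, List.map_cons, htail, ih (pre ++ [y])]
      rw [List.filter_cons]
      have hyc : (!pre.contains y) = true := by simp [hy]
      rw [hyc, if_pos rfl, List.filter_filter]
      congr 1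
      apply List.filter_congr
      intro z _
      by_cases h1 : z = y <;> by_cases h2 : z ∈ pre <;> simp [h1, h2]

-- dedup of the flattened stream is what B's position filter keeps.
theorem pv_dedup_eq_alt (transitions : List (String × List (String × String))) :
    PySem.List.dedup (transitions.flatMap (fun p => p.1 :: p.2.map Prod.snd))
      = collect_states_from_transitions_alt transitions := by
  simp only [collect_states_from_transitions_alt]
  have hpred : ∀ p ∈ PySem.List.enumerate (transitions.flatMap (fun p => p.1 :: p.2.map Prod.snd)),
      (((PySem.List.enumerate (transitions.flatMap (fun p => p.1 :: p.2.map Prod.snd))).reverse.foldl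
          (fun d p => d.insert p.2 p.1) PySem.Dict.empty).getD p.2 (-1) == p.1)
        = (pvFirstVal (transitions.flatMap (fun p => p.1 :: p.2.map Prod.snd)) p.2 == p.1) := by
    intro p _
    rw [pv_getD_first]
  rw [List.filter_congr hpred]
  have h := pv_suffix_select (transitions.flatMap (fun p => p.1 :: p.2.map Prod.snd)) ([] : List String)
  simp only [List.length_nil, Nat.cast_zero, List.contains_nil, Bool.not_false,
             List.filter_true, List.nil_append] at h
  exact h.symm

theorem collect_eq (transitions : List (String × List (String × String))) :
    collect_states_from_transitions transitions = collect_states_from_transitions_alt transitions := by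
  unfold collect_states_from_transitions
  rw [show (PySem.Set.empty : PySem.Set String) = ([] : List String) from rfl]
  rw [pv_outer_eq]
  have h0 : ((transitions.flatMap (fun p => p.1 :: p.2.map Prod.snd)).foldl PySem.Set.add ([] : List String))
      = PySem.List.dedup (transitions.flatMap (fun p => p.1 :: p.2.map Prod.snd)) := by
    simp [PySem.List.dedup_eq_ofList, PySem.Set.ofList]
  simpa [h0] using pv_dedup_eq_alt transitions

-- ===== VERDICT (by name: the statement is the Claim_ definition above) =====
theorem collect_states_from_transitions_spec : Claim_equal_collect_states_from_transitions := by
  intro transitions _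
  exact (collect_eq transitions).symm ▸ rfl
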